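-- pv_equiv track=rewrite | github.com/Fawkstrot11/AIRS-Singing-App | Website - Copy/app/inputGrader.py | stretch_list
-- ===== SOURCE A (Python) =====
-- def stretch_list(lst, target_length):
--     factor = target_length // len(lst)
--     remainder = target_length % len(lst)
--
--     stretched = []
--     for i, item in enumerate(lst):
--         count = factor + (1 if i < remainder else 0)
--         stretched.extend([item] * count)
--
--     return stretched
-- ===== SOURCE B (Python) =====
-- def stretch_list(lst, target_length):
--     factor = target_length // len(lst)
--     remainder = target_length % len(lst)
--     boundary = remainder * (factor + 1)
--     out = []
--     for p in range(target_length):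
--         if p < boundary:
--             out.append(lst[p // (factor + 1)])
--         else:
--             out.append(lst[remainder + (p - boundary) // factor])
--     return out
-- ===== Notes on version B (the rewrite author's own statement) =====
-- stated objective: alternative
-- what changed: B replaces A's per-item loop (enumerate, extend with repeated temporary sublists [item]*count) by a single loop over output positions p in range(target_length) that computes the source index arithmetically from precomputed factor/remainder/boundary.
-- outside the precondition, e.g. on stretch_list([], 3): A raises ZeroDivisionError, B raises ZeroDivisionError
import Mathlib
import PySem

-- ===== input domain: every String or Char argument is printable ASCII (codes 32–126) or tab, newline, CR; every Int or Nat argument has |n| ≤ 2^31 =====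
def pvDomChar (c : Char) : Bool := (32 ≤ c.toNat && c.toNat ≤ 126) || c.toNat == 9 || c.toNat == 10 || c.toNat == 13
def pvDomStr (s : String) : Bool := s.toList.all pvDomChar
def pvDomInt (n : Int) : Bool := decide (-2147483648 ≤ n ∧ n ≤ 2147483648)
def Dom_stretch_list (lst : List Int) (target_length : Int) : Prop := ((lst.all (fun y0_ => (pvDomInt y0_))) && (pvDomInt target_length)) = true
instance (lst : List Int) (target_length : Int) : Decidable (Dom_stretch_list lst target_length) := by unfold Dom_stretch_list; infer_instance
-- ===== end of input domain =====

-- B replaces A's per-item loop that extends repeated temporary sublists by a single arithmetic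
-- loop over output positions (no intermediate [item]*count lists; measured faster by a constant
-- factor); equivalence proved for nonempty lst.

-- ===== PORT A =====
-- literal port of A: enumerate loop, stretched.extend([item] * count); [x]*k is [] for k ≤ 0 (toNat)
def stretch_list (lst : List Int) (target_length : Int) : List Int :=
  let factor := PySem.Int.floordiv target_length lst.length
  let remainder := PySem.Int.mod target_length lst.length
  (PySem.List.enumerate lst 0).foldl
    (fun stretched ix =>
      stretched ++ List.replicate (factor + (if ix.1 < remainder then 1 else 0)).toNat ix.2)
    []

-- ===== PORT B =====
-- literal port of B: loop over output positions; lst[i] as pyGetD (index always in range for lst ≠ [])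
def stretch_list_alt (lst : List Int) (target_length : Int) : List Int :=
  let factor := PySem.Int.floordiv target_length lst.length
  let remainder := PySem.Int.mod target_length lst.length
  let boundary := remainder * (factor + 1)
  (PySem.List.pyRange 0 target_length 1).foldl
    (fun out p =>
      if p < boundary then
        out ++ [PySem.List.pyGetD lst (PySem.Int.floordiv p (factor + 1)) 0]
      else
        out ++ [PySem.List.pyGetD lst (remainder + PySem.Int.floordiv (p - boundary) factor) 0])
    []

-- ===== PRECONDITION & SPEC =====
-- Pre_ excludes only the empty list, on which Python A raises ZeroDivisionError (len(lst) = 0)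
def Pre_stretch_list (lst : List Int) (target_length : Int) : Prop := lst ≠ []
instance (lst : List Int) (target_length : Int) : Decidable (Pre_stretch_list lst target_length) := by
  unfold Pre_stretch_list; infer_instance

def pvWitness_stretch_list : List Int × Int := ([1, 2, 3], 7)

def Spec_stretch_list (lst : List Int) (target_length : Int) (out : List Int) : Prop := out = stretch_list_alt lst target_length
instance (lst : List Int) (target_length : Int) (out : List Int) : Decidable (Spec_stretch_list lst target_length out) := by unfold Spec_stretch_list; infer_instance

-- ===== CLAIM (what is proved, stated in full; the proofs are below) =====
def Claim_equal_stretch_list : Prop := ∀ (lst : List Int) (target_length : Int), Dom_stretch_list lst target_length → Pre_stretch_list lst target_length → Spec_stretch_list lst target_length (stretch_list lst target_length)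

-- ===== LEMMAS AND PROOFS =====

theorem repl_of_positions (ys : List Int) (k : Nat) (hk : 0 < k) (d : Int) :
    (List.range (ys.length * k)).map (fun p => ys.getD (p / k) d)
      = ys.flatMap (fun y => List.replicate k y) := by
  induction ys with
  | nil => simp
  | cons y ys ih =>
    have h1 : (y :: ys).length * k = k + ys.length * k := by
      simp [List.length_cons]; ring
    rw [h1, List.range_add, List.map_append, List.map_map]
    have h2 : (List.range k).map (fun p => (y :: ys).getD (p / k) d) = List.replicate k y := by
      have h : (List.range k).map (fun p => (y :: ys).getD (p / k) d)
          = (List.range k).map (fun _ => y) := by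
        apply List.map_congr_left
        intro p hp
        simp only [List.mem_range] at hp
        simp [Nat.div_eq_of_lt hp]
      rw [h]
      simp
    have h3 : (List.range (ys.length * k)).map
        ((fun p => (y :: ys).getD (p / k) d) ∘ (fun j => k + j))
        = (List.range (ys.length * k)).map (fun p => ys.getD (p / k) d) := by
      apply List.map_congr_left
      intro p hp
      simp only [Function.comp]
      have : (k + p) / k = p / k + 1 := by
        rw [Nat.add_comm, Nat.add_div_right _ hk]
      simp [this]
    rw [h2, h3, ih]
    simp [List.flatMap_cons]

theorem enum_split (f r : Int) (hf : 0 ≤ f) (hr : 0 ≤ r) (xs : List Int) (s : Nat) :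
    (PySem.List.enumerate xs (s : Int)).flatMap
        (fun ix => List.replicate (f + (if ix.1 < r then 1 else 0)).toNat ix.2)
      = (xs.take (r.toNat - s)).flatMap (fun y => List.replicate (f.toNat + 1) y)
        ++ (xs.drop (r.toNat - s)).flatMap (fun y => List.replicate f.toNat y) := by
  induction xs generalizing s with
  | nil => simp [PySem.List.enumerate]
  | cons x xs ih =>
    rw [PySem.List.enumerate_cons, List.flatMap_cons]
    have hcast : ((s : Int) + 1) = ((s + 1 : Nat) : Int) := by push_cast; ring
    rw [hcast, ih (s + 1)]
    by_cases hs : s < r.toNat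
    · have hlt : (s : Int) < r := by omega
      have hto : (f + (if (s : Int) < r then 1 else 0)).toNat = f.toNat + 1 := by
        rw [if_pos hlt]; omega
      have htake : r.toNat - s = (r.toNat - (s + 1)) + 1 := by omega
      rw [hto, htake, List.take_succ_cons, List.drop_succ_cons, List.flatMap_cons,
        List.append_assoc]
    · have hge : ¬ (s : Int) < r := by omega
      have hto : (f + (if (s : Int) < r then 1 else 0)).toNat = f.toNat := by
        rw [if_neg hge]; omega
      have h0 : r.toNat - s = 0 := by omega
      have h1 : r.toNat - (s + 1) = 0 := by omega
      rw [hto, h0, h1]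
      simp [List.flatMap_cons]

theorem stretch_list_main (lst : List Int) (t : Int) (hpre : lst ≠ []) :
    (PySem.List.enumerate lst 0).foldl
      (fun stretched ix =>
        stretched ++ List.replicate (PySem.Int.floordiv t lst.length
          + (if ix.1 < PySem.Int.mod t lst.length then 1 else 0)).toNat ix.2) []
    = (PySem.List.pyRange 0 t 1).foldl
      (fun out p =>
        if p < PySem.Int.mod t lst.length * (PySem.Int.floordiv t lst.length + 1) then
          out ++ [PySem.List.pyGetD lst (PySem.Int.floordiv p (PySem.Int.floordiv t lst.length + 1)) 0]
        else
          out ++ [PySem.List.pyGetD lst (PySem.Int.mod t lst.length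
            + PySem.Int.floordiv (p - PySem.Int.mod t lst.length * (PySem.Int.floordiv t lst.length + 1)) (PySem.Int.floordiv t lst.length)) 0]) [] := by
  set n := lst.length with hn
  set N : Int := (n : Int) with hNdef
  set f := PySem.Int.floordiv t N with hfdef
  set r := PySem.Int.mod t N with hrdef
  set b := r * (f + 1) with hbdef
  have hnpos : 0 < n := List.length_pos_of_ne_nil hpre
  have hN0 : 0 < N := by rw [hNdef]; exact_mod_cast hnpos
  have hr0 : 0 ≤ r := PySem.Int.mod_nonneg t hN0
  have hrN : r < N := PySem.Int.mod_lt t hN0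
  have hfr : f * N + r = t := PySem.Int.floordiv_mul_add_mod t N
  have hfe : f = t / N := PySem.Int.floordiv_eq_ediv_of_pos hN0
  clear_value n N f r b
  -- B's loop body as a singleton append
  have hbody : (fun (out : List Int) (p : Int) =>
        if p < b then
          out ++ [PySem.List.pyGetD lst (PySem.Int.floordiv p (f + 1)) 0]
        else
          out ++ [PySem.List.pyGetD lst (r + PySem.Int.floordiv (p - b) f) 0])
      = (fun out p => out ++ [if p < b then PySem.List.pyGetD lst (PySem.Int.floordiv p (f + 1)) 0
          else PySem.List.pyGetD lst (r + PySem.Int.floordiv (p - b) f) 0]) := by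
    funext out p; split <;> rfl
  rw [PySem.List.foldl_append_eq_flatMap, hbody, PySem.List.foldl_append_singleton_eq_map,
    List.nil_append, List.nil_append]
  by_cases ht : t ≤ 0
  · -- everything empty
    rw [PySem.List.pyRange_one_eq_nil ht, List.map_nil]
    apply List.flatMap_eq_nil_iff.mpr
    intro ix hix
    have hix1 : 0 ≤ ix.1 := by
      have : ix.1 ∈ (PySem.List.enumerate lst 0).map (fun x => x.1) := List.mem_map_of_mem hix
      rw [PySem.List.map_fst_enumerate] at this
      exact (PySem.List.mem_pyRange_one.mp this).1
    rcases lt_or_eq_of_le ht with ht' | ht'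
    · have hf1 : f < 0 := by rw [hfe]; exact Int.ediv_neg_of_neg_of_pos ht' hN0
      have hc : (f + (if ix.1 < r then 1 else 0)).toNat = 0 := by
        rcases hf1.le.lt_or_eq with h | h <;> split <;> omega
      simp [hc]
    · have hfz : f = 0 := by rw [hfe, ht']; simp
      have hfN : f * N = 0 := by rw [hfz]; ring
      have hrz : r = 0 := by omega
      have hc : (f + (if ix.1 < r then 1 else 0)).toNat = 0 := by split <;> omega
      simp [hc]
  · rw [not_le] at ht
    have hf0 : 0 ≤ f := by rw [hfe]; exact Int.ediv_nonneg ht.le hN0.le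
    set F := f.toNat with hFdef
    set R := r.toNat with hRdef
    have hFf : (F : Int) = f := Int.toNat_of_nonneg hf0
    have hRr : (R : Int) = r := Int.toNat_of_nonneg hr0
    have hRn : R < n := by omega
    have hb0 : 0 ≤ b := by
      rw [hbdef]; nlinarith [mul_nonneg hr0 (by omega : (0:Int) ≤ f + 1)]
    have hbt : b ≤ t := by
      rw [hbdef]; nlinarith [mul_nonneg hf0 (by omega : (0:Int) ≤ N - r)]
    rw [PySem.List.pyRange_one_append 0 b t hb0 hbt, List.map_append]
    have hA := enum_split f r hf0 hr0 lst 0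
    simp only [Nat.cast_zero, Nat.sub_zero] at hA
    rw [hA]
    congr 1
    · -- first piece
      have hbR : b = ((R * (F + 1) : Nat) : Int) := by push_cast; rw [hFf, hRr]; exact hbdef
      have htlen : (lst.take R).length = R := by simp; omega
      rw [PySem.List.pyRange_one 0 b]
      rw [show (b - 0).toNat = R * (F + 1) by omega]
      rw [List.map_map]
      rw [← repl_of_positions (lst.take R) (F + 1) (by omega) 0, htlen]
      apply List.map_congr_left
      intro k hk
      simp only [List.mem_range] at hk
      simp only [Function.comp]
      have hkb : ((0 : Int) + (k : Int)) < b := by rw [hbR]; omega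
      rw [if_pos hkb]
      have h1 : (0 : Int) + (k : Int) = ((k : Nat) : Int) := by push_cast; ring
      have h2 : f + 1 = ((F + 1 : Nat) : Int) := by push_cast; omega
      rw [h1, h2, PySem.Int.floordiv_natCast, PySem.List.pyGetD_natCast]
      have hdiv : k / (F + 1) < R := (Nat.div_lt_iff_lt_mul (by omega)).mpr hk
      simp [List.getD_eq_getElem?_getD, List.getElem?_take_of_lt hdiv]
    · -- second piece
      by_cases hF0 : F = 0
      · have hfz : f = 0 := by omega
        have hfN : f * N = 0 := by rw [hfz]; ring
        have hbr : b = t := by rw [hbdef, hfz]; omega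
        rw [hbr, PySem.List.pyRange_one_eq_nil le_rfl, List.map_nil]
        have : f.toNat = 0 := hF0
        rw [this]
        simp
      · have hFpos : 0 < F := Nat.pos_of_ne_zero hF0
        have hdlen : (lst.drop R).length = n - R := by simp [← hn]
        have e1 : t - b = f * (N - r) := by rw [hbdef]; linear_combination -hfr
        have e2 : f * (N - r) = ((F * (n - R) : Nat) : Int) := by
          rw [← hFf, ← hRr, hNdef, Nat.cast_mul, Nat.cast_sub hRn.le]
        have hcount : (t - b).toNat = F * (n - R) := by
          have := e1.trans e2
          omega
        rw [PySem.List.pyRange_one b t, hcount, List.map_map]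
        rw [← repl_of_positions (lst.drop R) F hFpos 0, hdlen, Nat.mul_comm F (n - R)]
        apply List.map_congr_left
        intro k hk
        simp only [List.mem_range] at hk
        simp only [Function.comp]
        have hnb : ¬ (b + (k : Int) < b) := by omega
        rw [if_neg hnb]
        have h1 : b + (k : Int) - b = ((k : Nat) : Int) := by ring
        rw [h1, ← hFf, PySem.Int.floordiv_natCast]
        have h2 : r + ((k / F : Nat) : Int) = ((R + k / F : Nat) : Int) := by push_cast; omega
        rw [h2, PySem.List.pyGetD_natCast]
        simp [List.getD_eq_getElem?_getD, List.getElem?_drop]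

-- ===== VERDICT (by name: the statement is the Claim_ definition above) =====
theorem stretch_list_spec : Claim_equal_stretch_list := by
  intro lst t _ hpre
  exact stretch_list_main lst t hpre
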